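-- pv_equiv track=rewrite | github.com/GOKUZY-JPN/ai-reply-web | webapp.py | sanitize_part
-- ===== SOURCE A (Python) =====
-- def sanitize_part(value: str) -> str:
--     text = str(value or "").strip()
--     if not text:
--         return "unknown"
--     cleaned = []
--     last_dash = False
--     for char in text:
--         if char.isalnum() or char in {"_", "-"}:
--             cleaned.append(char)
--             last_dash = False
--         elif char.isspace() or char in {"/", ".", ","}:
--             if not last_dash:
--                 cleaned.append("-")
--                 last_dash = True
--         else:
--             if not last_dash:
--                 cleaned.append("-")
--                 last_dash = True
--     return "".join(cleaned).strip("-") or "unknown"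
-- ===== SOURCE B (Python) =====
-- def sanitize_part(value: str) -> str:
--     text = str(value or "").strip()
--     if not text:
--         return "unknown"
--     parts = []
--     buf = []
--     for ch in text:
--         if ch.isalnum() or ch in {"_", "-"}:
--             buf.append(ch)
--         elif buf:
--             parts.append("".join(buf))
--             buf = []
--     if buf:
--         parts.append("".join(buf))
--     return "-".join(parts).strip("-") or "unknown"
-- ===== Notes on version B (the rewrite author's own statement) =====
-- stated objective: simpler
-- what changed: Replaces the per-character emit-plus-last_dash-flag state machine with a token-accumulation pass: allowed characters grow a buffer, any disallowed character flushes the nonempty buffer into a parts list, and the parts are dash-joined, edge-stripped of dashes, with the usual fallback placeholder for an empty result.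
import Mathlib
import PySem

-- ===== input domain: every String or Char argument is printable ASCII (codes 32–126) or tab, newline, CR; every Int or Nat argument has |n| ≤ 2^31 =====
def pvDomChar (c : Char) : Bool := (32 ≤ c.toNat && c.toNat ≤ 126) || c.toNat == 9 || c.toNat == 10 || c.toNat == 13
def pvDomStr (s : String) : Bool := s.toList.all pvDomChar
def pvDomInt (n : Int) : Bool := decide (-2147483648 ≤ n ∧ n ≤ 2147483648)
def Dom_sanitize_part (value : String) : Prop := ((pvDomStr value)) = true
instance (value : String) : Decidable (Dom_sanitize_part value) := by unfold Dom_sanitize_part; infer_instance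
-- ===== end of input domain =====

-- B replaces A's emit-plus-last_dash state machine by a token-accumulation pass (same return value, proved below).

-- ===== PORT A =====
-- the allowed-character test 'char.isalnum() or char in {"_", "-"}'
def pvAllowed (c : Char) : Bool := PySem.Chars.isalnum c || c == '_' || c == '-'

-- one iteration of A's loop body over the state (cleaned, last_dash)
def pvStepA (st : List Char × Bool) (c : Char) : List Char × Bool :=
  if pvAllowed c then (st.1 ++ [c], false)
  else if PySem.Chars.isspace c || c == '/' || c == '.' || c == ',' then
    (if !st.2 then (st.1 ++ ['-'], true) else st)
  else
    (if !st.2 then (st.1 ++ ['-'], true) else st)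

def sanitize_part (value : String) : String :=
  let text := PySem.Str.strip (if value = "" then "" else value)
  if text = "" then "unknown"
  else
    let st := text.toList.foldl pvStepA ([], false)
    let r := PySem.Chars.stripChars st.1 ['-']
    if r = [] then "unknown" else String.ofList r

-- ===== PORT B =====
-- one iteration of B's loop body over the state (parts, buf)
def pvStepB (st : List (List Char) × List Char) (c : Char) : List (List Char) × List Char :=
  if pvAllowed c then (st.1, st.2 ++ [c])
  else if st.2 ≠ [] then (st.1 ++ [st.2], [])
  else st

def sanitize_part_alt (value : String) : String :=
  let text := PySem.Str.strip (if value = "" then "" else value)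
  if text = "" then "unknown"
  else
    let st := text.toList.foldl pvStepB ([], [])
    let parts := if st.2 ≠ [] then st.1 ++ [st.2] else st.1
    let r := PySem.Chars.stripChars (PySem.Chars.join ['-'] parts) ['-']
    if r = [] then "unknown" else String.ofList r

-- ===== PRECONDITION & SPEC =====
def Spec_sanitize_part (value : String) (out : String) : Prop := out = sanitize_part_alt value
instance (value : String) (out : String) : Decidable (Spec_sanitize_part value out) := by unfold Spec_sanitize_part; infer_instance

-- ===== CLAIM (what is proved, stated in full; the proofs are below) =====
def Claim_equal_sanitize_part : Prop := ∀ (value : String), Dom_sanitize_part value → Spec_sanitize_part value (sanitize_part value)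

-- ===== LEMMAS AND PROOFS =====

def pvJoin (ps : List (List Char)) : List Char := PySem.Chars.join ['-'] ps

def pvDash (b : Bool) : List Char := if b then ['-'] else []

-- loop invariant: A's (cleaned, last_dash) is determined by B's (parts, buf) up to an optional leading dash
def pvInv (cl : List Char) (ld : Bool) (ps : List (List Char)) (buf : List Char) : Prop :=
  ∃ lead : Bool,
    if ld then buf = [] ∧ cl = pvDash lead ++ pvJoin ps ++ (if ps = [] then [] else ['-'])
    else (buf = [] → ps = [] ∧ lead = false) ∧ cl = pvDash lead ++ pvJoin (ps ++ [buf])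

lemma pvJoin_snoc (qs : List (List Char)) (b : List Char) :
    pvJoin (qs ++ [b]) = if qs = [] then b else pvJoin qs ++ ['-'] ++ b := by
  induction qs with
  | nil => simp [pvJoin, PySem.Chars.join, List.intercalate]
  | cons q qs ih =>
    cases qs with
    | nil => simp [pvJoin, PySem.Chars.join, List.intercalate, List.intersperse]
    | cons q' qs' =>
      simp only [pvJoin, PySem.Chars.join] at ih ⊢
      simp only [List.cons_append,
        show ∀ (x y : List Char) (zs : List (List Char)),
          ['-'].intercalate (x :: y :: zs) = x ++ '-' :: ['-'].intercalate (y :: zs) from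
          fun x y zs => by simp [List.intercalate, List.intersperse]]
      simp at ih
      simp [ih]

lemma pvJoin_last_snoc (qs : List (List Char)) (b : List Char) (c : Char) :
    pvJoin (qs ++ [b ++ [c]]) = pvJoin (qs ++ [b]) ++ [c] := by
  rw [pvJoin_snoc, pvJoin_snoc]; split <;> simp

lemma pvStrip_cons (X : List Char) :
    PySem.Chars.stripChars ('-' :: X) ['-'] = PySem.Chars.stripChars X ['-'] := by
  simp [PySem.Chars.stripChars, List.dropWhile]

lemma pvStrip_dash (b : Bool) (X : List Char) :
    PySem.Chars.stripChars (pvDash b ++ X) ['-'] = PySem.Chars.stripChars X ['-'] := by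
  cases b <;> simp [pvDash, pvStrip_cons]

lemma pvStrip_snoc (X : List Char) :
    PySem.Chars.stripChars (X ++ ['-']) ['-'] = PySem.Chars.stripChars X ['-'] := by
  simp only [PySem.Chars.stripChars, List.dropWhile_append]
  by_cases h : ∀ x ∈ X, x = '-'
  · have hnil : List.dropWhile (fun c => decide (c = '-')) X = [] := by
      rw [List.dropWhile_eq_nil_iff]; intro x hx; simpa using h x hx
    simp [hnil, List.dropWhile]
  · simp [h]

-- the invariant is preserved by one loop iteration
lemma pvInv_step (cl : List Char) (ld : Bool) (ps : List (List Char)) (buf : List Char)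
    (c : Char) (h : pvInv cl ld ps buf) :
    pvInv (pvStepA (cl, ld) c).1 (pvStepA (cl, ld) c).2 (pvStepB (ps, buf) c).1 (pvStepB (ps, buf) c).2 := by
  obtain ⟨lead, hinv⟩ := h
  by_cases hc : pvAllowed c = true
  · -- allowed: A appends c, B extends buf
    cases ld with
    | false =>
      simp only [if_neg Bool.false_ne_true] at hinv
      exact ⟨lead, by
        simp [pvStepA, pvStepB, hc, hinv.2, pvJoin_last_snoc]⟩
    | true =>
      simp only [reduceIte] at hinv
      refine ⟨lead, ?_⟩
      simp only [pvStepA, pvStepB, hc, reduceIte]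
      constructor
      · intro hbc; simp at hbc
      · rw [hinv.1] at *
        rw [pvJoin_snoc]
        by_cases hps : ps = []
        · subst hps
          rcases hinv with ⟨-, hcl⟩
          simp at hcl
          simp [hcl, pvJoin, PySem.Chars.join, List.intercalate]
        · rcases hinv with ⟨-, hcl⟩
          rw [if_neg hps] at hcl
          simp [hps, hcl]
  · -- disallowed: both of A's remaining branches do the same thing
    cases ld with
    | true =>
      -- A is a no-op; buf = [] so B is a no-op too
      simp only [reduceIte] at hinv
      refine ⟨lead, ?_⟩
      simp [pvStepA, pvStepB, hc, hinv.1, hinv.2]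
    | false =>
      simp only [if_neg Bool.false_ne_true] at hinv
      by_cases hb : buf = []
      · -- only reachable with ps = [], lead = false, cl = []
        obtain ⟨hpl, hcl⟩ := hinv
        obtain ⟨hps, hlead⟩ := hpl hb
        subst hb hps hlead
        simp [pvJoin, PySem.Chars.join, List.intercalate, pvDash] at hcl
        refine ⟨true, ?_⟩
        simp [pvStepA, pvStepB, hc, hcl, pvDash, pvJoin, PySem.Chars.join, List.intercalate]
      · -- flush: A appends '-', B moves buf into parts
        obtain ⟨-, hcl⟩ := hinv
        refine ⟨lead, ?_⟩
        simp only [pvStepA, pvStepB, hc]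
        simp [hb, hcl]
lemma pvInv_loop (cs : List Char) (cl : List Char) (ld : Bool)
    (ps : List (List Char)) (buf : List Char) (h : pvInv cl ld ps buf) :
    pvInv (cs.foldl pvStepA (cl, ld)).1 (cs.foldl pvStepA (cl, ld)).2
          (cs.foldl pvStepB (ps, buf)).1 (cs.foldl pvStepB (ps, buf)).2 := by
  induction cs generalizing cl ld ps buf with
  | nil => exact h
  | cons c cs ih =>
    simpa using ih _ _ _ _ (pvInv_step cl ld ps buf c h)

-- at the end of the loops the two stripped results coincide
lemma pvFinal (cl : List Char) (ld : Bool) (ps : List (List Char)) (buf : List Char)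
    (h : pvInv cl ld ps buf) :
    PySem.Chars.stripChars cl ['-'] =
      PySem.Chars.stripChars (pvJoin (if buf ≠ [] then ps ++ [buf] else ps)) ['-'] := by
  obtain ⟨lead, hinv⟩ := h
  cases ld with
  | true =>
    simp only [reduceIte] at hinv
    obtain ⟨hb, hcl⟩ := hinv
    subst hb
    simp only [ne_eq, not_true_eq_false, reduceIte] at *
    rw [hcl, List.append_assoc, pvStrip_dash]
    by_cases hps : ps = []
    · simp [hps]
    · rw [if_neg hps]
      exact pvStrip_snoc (pvJoin ps)
  | false =>
    simp only [if_neg Bool.false_ne_true] at hinv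
    obtain ⟨hpl, hcl⟩ := hinv
    by_cases hb : buf = []
    · obtain ⟨hps, hlead⟩ := hpl hb
      subst hb hps hlead
      simp [pvDash] at hcl
      simp [hcl, pvJoin, PySem.Chars.join, List.intercalate]
    · rw [hcl, pvStrip_dash]
      simp [hb]

-- ===== VERDICT (by name: the statement is the Claim_ definition above) =====
theorem sanitize_part_spec : Claim_equal_sanitize_part := by
  intro value _
  unfold Spec_sanitize_part sanitize_part sanitize_part_alt
  simp only []
  by_cases ht : PySem.Str.strip (if value = "" then "" else value) = ""
  · simp [ht]
  · simp only [ht, reduceIte]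
    have h := pvInv_loop (PySem.Str.strip (if value = "" then "" else value)).toList
      [] false [] [] ⟨false, by simp [pvDash, pvJoin, PySem.Chars.join, List.intercalate]⟩
    have := pvFinal _ _ _ _ h
    rw [show PySem.Chars.join ['-'] = pvJoin from rfl] at *
    rw [this]
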